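-- pv_equiv track=rewrite | github.com/Min-ji99/BES2-AlgorithmStudy | PG/Brute_Force/PG_42840.py | solution
-- ===== SOURCE A (Python) =====
-- def solution(answers):
--     result=[]
--     pattern1=[1, 2, 3, 4, 5]
--     pattern2=[2, 1, 2, 3, 2, 4, 2, 5]
--     pattern3=[3, 3, 1, 1, 2, 2, 4, 4, 5, 5]
--     score=[0, 0, 0]
--     for i, answer in enumerate(answers) :
--         if answer==pattern1[i%len(pattern1)] :
--             score[0]+=1
--         if answer==pattern2[i%len(pattern2)] :
--             score[1]+=1
--         if answer==pattern3[i%len(pattern3)] :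
--             score[2]+=1
--     for i in range(len(score)) :
--         if score[i]==max(score) :
--             result.append(i+1)
--     return result
-- ===== SOURCE B (Python) =====
-- def solution(answers):
--     patterns = [[1, 2, 3, 4, 5],
--                 [2, 1, 2, 3, 2, 4, 2, 5],
--                 [3, 3, 1, 1, 2, 2, 4, 4, 5, 5]]
--     # All three patterns repeat with period dividing 40 (= lcm(5, 8, 10)).
--     # Index the answers once by (position mod 40, value); each score is then
--     # 40 dictionary lookups, with no further scan of the answers.
--     counts = {}
--     for i, a in enumerate(answers):
--         key = (i % 40, a)
--         counts[key] = counts.get(key, 0) + 1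
--     scores = [sum(counts.get((r, p[r % len(p)]), 0) for r in range(40))
--               for p in patterns]
--     best = max(scores)
--     return [k + 1 for k, s in enumerate(scores) if s == best]
-- ===== Notes on version B (the rewrite author's own statement) =====
-- stated objective: alternative
-- what changed: Instead of A's fused loop that compares every answer against all three patterns as it goes, B builds one hash index counts[(i mod 40, answer)] in a single pass (40 = lcm of the pattern periods) and then computes each score as 40 dictionary lookups, never rescanning the answers; selection is max + comprehension instead of A's index loop.
import Mathlib
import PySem

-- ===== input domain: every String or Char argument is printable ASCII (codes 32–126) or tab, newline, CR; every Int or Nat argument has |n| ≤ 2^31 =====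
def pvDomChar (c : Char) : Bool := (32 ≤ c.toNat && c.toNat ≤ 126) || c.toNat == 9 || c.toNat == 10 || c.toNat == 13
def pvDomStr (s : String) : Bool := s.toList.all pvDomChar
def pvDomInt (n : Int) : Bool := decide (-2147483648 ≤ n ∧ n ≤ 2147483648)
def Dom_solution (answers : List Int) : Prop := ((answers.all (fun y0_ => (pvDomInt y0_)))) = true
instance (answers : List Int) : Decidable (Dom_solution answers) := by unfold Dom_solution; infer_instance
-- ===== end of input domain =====

-- B replaces A's fused per-answer comparison loop by a hash index counts[(i mod 40, answer)]
-- built once (40 = lcm of the pattern periods); each score is then 40 dictionary lookups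
-- with no further scan of the answers. Same O(n) cost; a genuinely different algorithm.

-- ===== PORT A =====
def pattern1 : List Int := [1, 2, 3, 4, 5]
def pattern2 : List Int := [2, 1, 2, 3, 2, 4, 2, 5]
def pattern3 : List Int := [3, 3, 1, 1, 2, 2, 4, 4, 5, 5]

def solution (answers : List Int) : List Int :=
  let score := (PySem.List.enumerate answers).foldl
    (fun (s : Int × Int × Int) (ia : Int × Int) =>
      (if ia.2 = PySem.List.pyGetD pattern1 (PySem.Int.mod ia.1 5) 0 then s.1 + 1 else s.1,
       if ia.2 = PySem.List.pyGetD pattern2 (PySem.Int.mod ia.1 8) 0 then s.2.1 + 1 else s.2.1,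
       if ia.2 = PySem.List.pyGetD pattern3 (PySem.Int.mod ia.1 10) 0 then s.2.2 + 1 else s.2.2))
    (0, 0, 0)
  let scoreL : List Int := [score.1, score.2.1, score.2.2]
  (PySem.List.pyRange 0 3 1).foldl
    (fun r i =>
      if PySem.List.pyGetD scoreL i 0 =
          (PySem.List.max? scoreL (fun x => x)).getD 0 then r ++ [i + 1] else r)
    []

-- ===== PORT B =====
def patternsB : List (List Int) :=
  [[1, 2, 3, 4, 5], [2, 1, 2, 3, 2, 4, 2, 5], [3, 3, 1, 1, 2, 2, 4, 4, 5, 5]]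

def solution_alt (answers : List Int) : List Int :=
  let counts : PySem.Dict (Int × Int) Int :=
    (PySem.List.enumerate answers).foldl
      (fun d ia =>
        let key : Int × Int := (PySem.Int.mod ia.1 40, ia.2)
        d.insert key (d.getD key 0 + 1))
      PySem.Dict.empty
  let scores : List Int := patternsB.map (fun p =>
    ((PySem.List.pyRange 0 40 1).map (fun r =>
      counts.getD (r, PySem.List.pyGetD p (PySem.Int.mod r (p.length : Int)) 0) 0)).sum)
  let best := (PySem.List.max? scores (fun x => x)).getD 0
  (PySem.List.enumerate scores).filterMap
    (fun ks => if ks.2 = best then some (ks.1 + 1) else none)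

-- ===== PRECONDITION & SPEC =====
def Spec_solution (answers : List Int) (out : List Int) : Prop := out = solution_alt answers
instance (answers : List Int) (out : List Int) : Decidable (Spec_solution answers out) := by unfold Spec_solution; infer_instance

-- ===== CLAIM (what is proved, stated in full; the proofs are below) =====
def Claim_equal_solution : Prop := ∀ (answers : List Int), Dom_solution answers → Spec_solution answers (solution answers)

-- ===== LEMMAS AND PROOFS =====

-- A's fused loop is the triple of per-pattern counts (specific to the two ports).
theorem fused_fold_eq_counts (l : List (Int × Int)) (a b c : Int) :
    l.foldl
      (fun (s : Int × Int × Int) (ia : Int × Int) =>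
        (if ia.2 = PySem.List.pyGetD pattern1 (PySem.Int.mod ia.1 5) 0 then s.1 + 1 else s.1,
         if ia.2 = PySem.List.pyGetD pattern2 (PySem.Int.mod ia.1 8) 0 then s.2.1 + 1 else s.2.1,
         if ia.2 = PySem.List.pyGetD pattern3 (PySem.Int.mod ia.1 10) 0 then s.2.2 + 1 else s.2.2))
      (a, b, c)
    = (a + (l.countP (fun ia => ia.2 == PySem.List.pyGetD pattern1 (PySem.Int.mod ia.1 5) 0) : Int),
       b + (l.countP (fun ia => ia.2 == PySem.List.pyGetD pattern2 (PySem.Int.mod ia.1 8) 0) : Int),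
       c + (l.countP (fun ia => ia.2 == PySem.List.pyGetD pattern3 (PySem.Int.mod ia.1 10) 0) : Int)) := by
  induction l generalizing a b c with
  | nil => simp
  | cons hd tl ih =>
      simp only [List.foldl_cons, List.countP_cons, ih]
      by_cases h1 : hd.2 = PySem.List.pyGetD pattern1 (PySem.Int.mod hd.1 5) 0 <;>
      by_cases h2 : hd.2 = PySem.List.pyGetD pattern2 (PySem.Int.mod hd.1 8) 0 <;>
      by_cases h3 : hd.2 = PySem.List.pyGetD pattern3 (PySem.Int.mod hd.1 10) 0 <;>
        simp only [beq_iff_eq, h1, h2, h3, if_pos, if_neg, not_false_eq_true, Prod.mk.injEq] <;>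
        refine ⟨?_, ?_, ?_⟩ <;> push_cast <;> omega

-- the residue m = i % 40 picks exactly one term of the 40-term sum
theorem sum_indicator_range40 (m a : Int) (g : Int → Int) (hm0 : 0 ≤ m) (hm : m < 40) :
    (((List.range 40).map (fun r : Nat =>
        (if (m, a) == ((r : Int), g (r : Int)) then (1 : Int) else 0))).sum)
    = (if a == g m then (1 : Int) else 0) := by
  obtain ⟨n, rfl⟩ := Int.eq_ofNat_of_zero_le hm0
  have hn : n < 40 := by exact_mod_cast hm
  have hbridge :
      (((List.range 40).map (fun r : Nat =>
        (if ((n : Int), a) == ((r : Int), g (r : Int)) then (1 : Int) else 0))).sum)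
      = ∑ r ∈ Finset.range 40,
          (if ((n : Int), a) == ((r : Int), g (r : Int)) then (1 : Int) else 0) := rfl
  rw [hbridge, Finset.sum_eq_single_of_mem n (Finset.mem_range.2 hn)]
  · simp
  · intro b _ hb
    simp only [beq_iff_eq, Prod.mk.injEq, ite_eq_right_iff, and_imp]
    intro h _
    exact absurd (by exact_mod_cast h) (Ne.symm hb)

-- the 40 lookups into the (i % 40, answer) index recover the per-pattern count
theorem sum_counts_eq_countP (l : List (Int × Int)) (g : Int → Int) :
    (((List.range 40).map (fun r : Nat =>
        (l.countP (fun ia =>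
          ((PySem.Int.mod ia.1 40, ia.2) == ((r : Int), g (r : Int)))) : Int))).sum)
    = (l.countP (fun ia => ia.2 == g (PySem.Int.mod ia.1 40)) : Int) := by
  induction l with
  | nil => simp
  | cons hd tl ih =>
      simp only [List.countP_cons]
      have hsplit :
          ((List.range 40).map (fun r : Nat =>
            ((tl.countP (fun ia =>
              ((PySem.Int.mod ia.1 40, ia.2) == ((r : Int), g (r : Int)))) +
              (if (PySem.Int.mod hd.1 40, hd.2) == ((r : Int), g (r : Int)) then 1 else 0) : Nat) : Int))).sum
          = ((List.range 40).map (fun r : Nat =>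
              (tl.countP (fun ia =>
                ((PySem.Int.mod ia.1 40, ia.2) == ((r : Int), g (r : Int)))) : Int))).sum
            + ((List.range 40).map (fun r : Nat =>
                (if (PySem.Int.mod hd.1 40, hd.2) == ((r : Int), g (r : Int)) then (1 : Int) else 0))).sum := by
        rw [← PySem.List.sum_map_add_int]
        apply congrArg List.sum
        apply List.map_congr_left
        intro r _
        push_cast
        split_ifs <;> simp
      rw [hsplit, ih,
        sum_indicator_range40 _ _ _ (PySem.Int.mod_nonneg _ (by norm_num))
          (PySem.Int.mod_lt _ (by norm_num))]
      push_cast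
      split_ifs <;> omega

-- A's final index loop and B's comprehension build the same selection
theorem final_select (s0 s1 s2 : Int) :
    (PySem.List.pyRange 0 3 1).foldl
      (fun r i =>
        if PySem.List.pyGetD [s0, s1, s2] i 0 =
            (PySem.List.max? [s0, s1, s2] (fun x => x)).getD 0 then r ++ [i + 1] else r)
      []
    = (PySem.List.enumerate [s0, s1, s2]).filterMap
        (fun ks => if ks.2 = (PySem.List.max? [s0, s1, s2] (fun x => x)).getD 0
                   then some (ks.1 + 1) else none) := by
  have hr : PySem.List.pyRange 0 3 1 = [0, 1, 2] := by decide
  rw [hr]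
  simp [PySem.List.enumerate, PySem.List.pyGetD, List.filterMap]
  split_ifs <;> simp

-- B's score for one pattern equals A's per-pattern count (k = pattern length, k ∣ 40)
theorem score_via_index (answers : List Int) (p : List Int) (k : Int)
    (hk : k = (p.length : Int)) (hkpos : 0 < k) (hdvd : k ∣ 40) :
    ((PySem.List.pyRange 0 40 1).map (fun r =>
      (((PySem.List.enumerate answers).foldl
        (fun d ia =>
          let key : Int × Int := (PySem.Int.mod ia.1 40, ia.2)
          d.insert key (d.getD key 0 + 1))
        PySem.Dict.empty).getD
        (r, PySem.List.pyGetD p (PySem.Int.mod r (p.length : Int)) 0) 0))).sum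
    = ((PySem.List.enumerate answers).countP
        (fun ia => ia.2 == PySem.List.pyGetD p (PySem.Int.mod ia.1 k) 0) : Int) := by
  subst hk
  -- the index-building loop over enumerate is the counter loop over the mapped keys
  have hfold :
      (PySem.List.enumerate answers).foldl
        (fun d ia =>
          let key : Int × Int := (PySem.Int.mod ia.1 40, ia.2)
          d.insert key (d.getD key 0 + 1))
        (PySem.Dict.empty : PySem.Dict (Int × Int) Int)
      = ((PySem.List.enumerate answers).map
          (fun ia => (PySem.Int.mod ia.1 40, ia.2))).foldl
          (fun d x => d.insert x (d.getD x 0 + 1)) PySem.Dict.empty := by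
    rw [List.foldl_map]
  rw [hfold]
  have hget : ∀ c : Int × Int,
      (((PySem.List.enumerate answers).map
          (fun ia => (PySem.Int.mod ia.1 40, ia.2))).foldl
          (fun d x => d.insert x (d.getD x 0 + 1)) PySem.Dict.empty).getD c 0
      = (((PySem.List.enumerate answers).map
          (fun ia => (PySem.Int.mod ia.1 40, ia.2))).count c : Int) := by
    intro c
    rw [PySem.Dict.getD_foldl_insert_add_one]
    simp [PySem.Dict.getD_empty]
  have hrange : PySem.List.pyRange 0 40 1 = (List.range 40).map (fun n : Nat => (n : Int)) :=
    PySem.List.pyRange_zero_natCast 40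
  rw [hrange, List.map_map]
  have hstep :
      ((List.range 40).map ((fun r =>
        (((PySem.List.enumerate answers).map
            (fun ia => (PySem.Int.mod ia.1 40, ia.2))).foldl
            (fun d x => d.insert x (d.getD x 0 + 1)) PySem.Dict.empty).getD
          (r, PySem.List.pyGetD p (PySem.Int.mod r (p.length : Int)) 0) 0) ∘
        (fun n : Nat => (n : Int)))).sum
      = ((List.range 40).map (fun r : Nat =>
          ((PySem.List.enumerate answers).countP (fun ia =>
            ((PySem.Int.mod ia.1 40, ia.2) ==
              ((r : Int), PySem.List.pyGetD p (PySem.Int.mod (r : Int) (p.length : Int)) 0))) : Int))).sum := by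
    apply congrArg List.sum
    apply List.map_congr_left
    intro r _
    simp only [Function.comp]
    rw [hget, List.count_eq_countP, List.countP_map]
    congr 1
  rw [hstep, sum_counts_eq_countP (PySem.List.enumerate answers)
        (fun r => PySem.List.pyGetD p (PySem.Int.mod r (p.length : Int)) 0)]
  congr 1
  apply List.countP_congr
  intro ia _
  have hmm : PySem.Int.mod (ia.1 % 40) ((p.length : Int)) = PySem.Int.mod ia.1 ((p.length : Int)) := by
    rw [PySem.Int.mod_eq_emod_of_pos hkpos, PySem.Int.mod_eq_emod_of_pos hkpos]
    exact Int.emod_emod_of_dvd ia.1 hdvd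
  simp [hmm]

-- ===== VERDICT (by name: the statement is the Claim_ definition above) =====
theorem solution_spec : Claim_equal_solution := by
  intro answers _
  unfold Spec_solution solution solution_alt
  simp only [patternsB, List.map, fused_fold_eq_counts, zero_add]
  simp only [score_via_index answers [1, 2, 3, 4, 5] 5 (by norm_num) (by norm_num) (by norm_num),
      score_via_index answers [2, 1, 2, 3, 2, 4, 2, 5] 8 (by norm_num) (by norm_num) (by norm_num),
      score_via_index answers [3, 3, 1, 1, 2, 2, 4, 4, 5, 5] 10 (by norm_num) (by norm_num) (by norm_num)]
  have := final_select
  simp only [pattern1, pattern2, pattern3] at *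
  exact this _ _ _
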